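-- pv_equiv track=rewrite | github.com/eggsacc/CS1010X-2025 | Recitations & tutorials/tut2.py | sum_even_factorials
-- ===== SOURCE A (Python) =====
-- def sum_even_factorials(n):
--     # Set n to previous even number if odd
--     if n % 2:
--         n -= 1
--
--     total_sum = 0
--     factorial = 1
--
--     for i in range(2, n + 1, 2):
--         # Multiple factorial by next 2 numbers
--         # * i and i-1 since i increments in steps of 2
--         factorial *= i * (i - 1)
--         total_sum += factorial
--
--     # +1 to compensate for skipping 1! in loop
--     return total_sum + 1
-- ===== SOURCE B (Python) =====
-- def sum_even_factorials(n):
--     # Set n to previous even number if odd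
--     if n % 2:
--         n -= 1
--     if n < 2:
--         return 1
--     # Horner evaluation back-to-front:
--     # 2! + 4! + ... + n! = 2*(1 + 3*4*(1 + 5*6*(1 + ... (1 + (n-1)*n) ...)))
--     acc = 1
--     for i in range(n, 2, -2):
--         acc = 1 + i * (i - 1) * acc
--     return 2 * acc + 1
-- ===== Notes on version B (the rewrite author's own statement) =====
-- stated objective: alternative
-- what changed: B replaces A's ascending loop with a running factorial and running sum by a back-to-front Horner evaluation of 2!+4!+...+n! = 2*(1 + 3*4*(1 + 5*6*(1 + ...))) over a descending range, with a single accumulator.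
import Mathlib
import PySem

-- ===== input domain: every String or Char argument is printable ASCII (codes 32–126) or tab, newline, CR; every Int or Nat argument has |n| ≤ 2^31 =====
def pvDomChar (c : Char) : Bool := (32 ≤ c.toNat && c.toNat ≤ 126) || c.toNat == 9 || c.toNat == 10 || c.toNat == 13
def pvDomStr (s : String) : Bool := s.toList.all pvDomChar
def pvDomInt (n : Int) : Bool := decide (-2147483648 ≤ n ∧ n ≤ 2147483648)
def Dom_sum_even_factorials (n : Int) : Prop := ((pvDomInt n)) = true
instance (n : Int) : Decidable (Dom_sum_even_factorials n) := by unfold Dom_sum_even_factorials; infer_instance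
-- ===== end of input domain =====

-- B replaces A's ascending loop (running factorial + running sum) by a
-- back-to-front Horner evaluation of 2!+4!+...+n! with one accumulator
-- (alternative; similar cost).


-- ===== PORT A =====
def sum_even_factorials (n : Int) : Int :=
  -- if n % 2: n -= 1
  let n := if PySem.Int.mod n 2 ≠ 0 then n - 1 else n
  -- total_sum = 0; factorial = 1; for i in range(2, n+1, 2): factorial *= i*(i-1); total_sum += factorial
  let st := (PySem.List.pyRange 2 (n + 1) 2).foldl
    (fun (st : Int × Int) i =>
      let factorial := st.2 * (i * (i - 1))
      (st.1 + factorial, factorial)) (0, 1)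
  st.1 + 1

-- ===== PORT B =====
def sum_even_factorials_alt (n : Int) : Int :=
  -- if n % 2: n -= 1
  let n := if PySem.Int.mod n 2 ≠ 0 then n - 1 else n
  -- if n < 2: return 1
  if n < 2 then 1
  else
    -- acc = 1; for i in range(n, 2, -2): acc = 1 + i*(i-1)*acc; return 2*acc + 1
    let acc := (PySem.List.pyRange n 2 (-2)).foldl (fun acc i => 1 + i * (i - 1) * acc) 1
    2 * acc + 1

-- ===== PRECONDITION & SPEC =====
def Spec_sum_even_factorials (n : Int) (out : Int) : Prop := out = sum_even_factorials_alt n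
instance (n : Int) (out : Int) : Decidable (Spec_sum_even_factorials n out) := by unfold Spec_sum_even_factorials; infer_instance

-- ===== CLAIM (what is proved, stated in full; the proofs are below) =====
def Claim_equal_sum_even_factorials : Prop := ∀ (n : Int), Dom_sum_even_factorials n → Spec_sum_even_factorials n (sum_even_factorials n)

-- ===== LEMMAS AND PROOFS =====

-- A's loop invariant over the even list [2,4,…,2c]: state = (Σ factorials, last factorial).
theorem pv_aux (c : Nat) :
    ((List.range c).map (fun k : Nat => (2 : Int) + 2 * (k : Int))).foldl
      (fun (st : Int × Int) i => (st.1 + st.2 * (i * (i - 1)), st.2 * (i * (i - 1)))) (0, 1)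
    = ((((List.range c).map (fun k : Nat => (2 : Int) + 2 * (k : Int))).map
         (fun i : Int => (Nat.factorial i.toNat : Int))).sum,
       (Nat.factorial (2 * c) : Int)) := by
  induction c with
  | zero => simp
  | succ c ih =>
    rw [List.range_succ, List.map_append, List.foldl_append, ih]
    simp only [List.map_cons, List.map_nil, List.foldl_cons, List.foldl_nil,
      List.map_append, List.sum_append]
    have htoNat : ((2 : Int) + 2 * (c : Nat)).toNat = 2 * c + 2 := by omega
    have hfac : ((Nat.factorial (2 * c)) : Int) * (((2 : Int) + 2 * c) * ((2 : Int) + 2 * c - 1))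
        = (Nat.factorial (2 * (c + 1)) : Int) := by
      have : 2 * (c + 1) = (2 * c + 1) + 1 := by omega
      rw [this, Nat.factorial_succ, Nat.factorial_succ]
      push_cast
      ring
    have h2 : 2 * c + 2 = 2 * (c + 1) := by omega
    rw [Prod.mk.injEq]
    constructor
    · simp [htoNat, h2, ← hfac]
    · rw [hfac]

-- Horner invariant for B's descending loop over [2c+2, 2c, ..., 4]:
-- twice the fold equals the sum of even factorials up to (2c)! plus (2c+2)!·a.
theorem pv_horner (c : Nat) (a : Int) :
    2 * ((List.range c).map (fun k : Nat => (2 * (c : Int) + 2) - 2 * (k : Int))).foldl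
          (fun acc i => 1 + i * (i - 1) * acc) a
      = (((List.range c).map (fun k : Nat => (2 : Int) + 2 * (k : Int))).map
          (fun i : Int => (Nat.factorial i.toNat : Int))).sum
        + (Nat.factorial (2 * c + 2) : Int) * a := by
  induction c generalizing a with
  | zero => simp
  | succ c ih =>
    conv_lhs => rw [List.range_succ_eq_map]
    simp only [List.map_cons, List.foldl_cons, List.map_map]
    have hfun : ((fun k : Nat => 2 * (((c + 1 : Nat)) : Int) + 2 - 2 * (k : Int)) ∘ Nat.succ)
        = fun k : Nat => (2 * (c : Int) + 2) - 2 * (k : Int) := by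
      funext k; simp only [Function.comp]; push_cast; ring
    rw [show (2 * (((c + 1 : Nat)) : Int) + 2 - 2 * ((0 : Nat) : Int))
          = 2 * (c : Int) + 4 by push_cast; ring, hfun, ih]
    conv_rhs => rw [List.range_succ]
    simp only [List.map_append, List.sum_append, List.map_cons, List.map_nil, List.sum_cons,
      List.sum_nil, List.map_map, Function.comp_apply, add_zero]
    have h1 : ((2 : Int) + 2 * (c : Int)).toNat = 2 * c + 2 := by omega
    have h2 : (Nat.factorial (2 * (c + 1) + 2) : Int)
        = (Nat.factorial (2 * c + 2) : Int) * ((2 * (c : Int) + 4) * (2 * (c : Int) + 4 - 1)) := by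
      have : 2 * (c + 1) + 2 = ((2 * c + 3) + 1) := by omega
      rw [this, Nat.factorial_succ, Nat.factorial_succ]
      push_cast; ring
    rw [h1, h2]
    ring

-- ===== VERDICT (by name: the statement is the Claim_ definition above) =====
theorem sum_even_factorials_spec : Claim_equal_sum_even_factorials := by
  intro n _
  unfold Spec_sum_even_factorials sum_even_factorials sum_even_factorials_alt
  dsimp only
  set m := if PySem.Int.mod n 2 ≠ 0 then n - 1 else n with hm
  have hfm : PySem.Int.mod n 2 = n % 2 := by
    show n.fmod 2 = n % 2
    rw [Int.fmod_eq_emod_of_nonneg]; norm_num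
  have hmeven : m % 2 = 0 := by
    by_cases h : PySem.Int.mod n 2 ≠ 0
    · simp only [hm, if_pos h]; rw [hfm] at h; omega
    · simp only [hm, if_neg h]; rw [hfm] at h; omega
  rw [PySem.List.pyRange_of_pos _ _ (by norm_num : (0:Int) < 2), pv_aux]
  by_cases hlt : (2 : Int) < m + 1
  · -- m even, m ≥ 2: write m = 2c + 2
    obtain ⟨c, hc⟩ : ∃ c : Nat, m = 2 * (c : Int) + 2 := by
      refine ⟨(m / 2 - 1).toNat, ?_⟩; omega
    rw [if_pos hlt, if_neg (by omega : ¬ m < 2),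
        PySem.List.pyRange_of_neg _ _ (by norm_num : (-2 : Int) < 0)]
    simp only [neg_neg]
    have hcntA : ((m + 1 - 2 + 2 - 1) / 2).toNat = c + 1 := by omega
    have hcntB : (if (2 : Int) < m then ((m - 2 + 2 - 1) / 2).toNat else 0) = c := by
      by_cases h : (2 : Int) < m
      · rw [if_pos h]; omega
      · rw [if_neg h]; omega
    rw [hcntA, hcntB]
    have hfunB : (fun k : Nat => m + (-2) * (k : Int))
        = fun k : Nat => (2 * (c : Int) + 2) - 2 * (k : Int) := by
      funext k; rw [hc]; ring
    rw [hfunB]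
    have := pv_horner c 1
    -- A-side sum over range (c+1) expands into sum over range c plus (2c+2)!
    rw [List.range_succ]
    simp only [List.map_append, List.sum_append, List.map_cons, List.map_nil, List.sum_cons,
      List.sum_nil]
    have h1 : ((2 : Int) + 2 * (c : Int)).toNat = 2 * c + 2 := by omega
    rw [h1]
    omega
  · rw [if_neg hlt, if_pos (by omega : m < 2)]
    simp
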